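-- pv_equiv track=rewrite | github.com/philippython/Python-Django-Graph-QL | weather_api/turing_test.py | winning_card
-- ===== SOURCE A (Python) =====
-- def winning_card(cards):
--
--     final_cards = []
--     multiple_cards = []
--     for card in cards:
--         for num in card :
--             if card.count(num) > 1 :
--                 multiple_cards.append(num)
--                 good_cards  = set(card) - set(multiple_cards)
--                 if good_cards != set(): final_cards.append(max(list(good_cards)))
--     return -1 if final_cards == [] else max(final_cards)
-- ===== SOURCE B (Python) =====
-- def winning_card(cards):
--     dup_seen = set()
--     ans = None
--     for card in cards:
--         counts = {}
--         for n in card: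
--             counts[n] = counts.get(n, 0) + 1
--         dups = [n for n in card if counts[n] > 1]
--         if dups:
--             dup_seen.add(dups[0])
--             good = [n for n in set(card) if n not in dup_seen]
--             if good:
--                 m = max(good)
--                 if ans is None or m > ans:
--                     ans = m
--             dup_seen.update(dups)
--     return -1 if ans is None else ans
-- ===== Notes on version B (the rewrite author's own statement) =====
-- stated objective: faster
-- what changed: A rescans the card with count() for every element and rebuilds a set difference per duplicate occurrence (quadratic per card); B builds one count dict per card, records only the first duplicate's good-set maximum (later events can only shrink the set), and maintains the cumulative duplicate set and a running max in one pass.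
import Mathlib
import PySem

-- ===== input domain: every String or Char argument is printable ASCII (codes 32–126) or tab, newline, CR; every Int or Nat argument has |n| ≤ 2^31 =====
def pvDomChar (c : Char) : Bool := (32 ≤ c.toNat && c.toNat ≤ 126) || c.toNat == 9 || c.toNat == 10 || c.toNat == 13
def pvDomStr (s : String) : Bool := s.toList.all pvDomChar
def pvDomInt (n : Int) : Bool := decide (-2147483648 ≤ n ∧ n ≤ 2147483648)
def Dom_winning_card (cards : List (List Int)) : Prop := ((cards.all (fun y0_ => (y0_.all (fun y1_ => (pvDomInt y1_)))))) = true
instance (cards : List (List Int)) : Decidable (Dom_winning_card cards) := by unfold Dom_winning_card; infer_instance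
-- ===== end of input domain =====

-- B replaces A's quadratic rescan (count inside the inner loop, a fresh set difference per duplicate)
-- by one count dict per card and a single first-duplicate max update; return values proved equal.

-- ===== PORT A =====
-- inner loop body of A: for num in card: if card.count(num) > 1: append; good = set(card)-set(mult); maybe append max
def wcInnerA (card : List Int) (st : List Int × List Int) (num : Int) : List Int × List Int :=
  if PySem.List.count card num > 1 then
    let multiple_cards := st.2 ++ [num]
    let good_cards := PySem.Set.diff (PySem.Set.ofList card) (PySem.Set.ofList multiple_cards)
    if PySem.Set.equal good_cards PySem.Set.empty = false then
      (st.1 ++ [(PySem.List.max? good_cards (fun x => x)).getD 0], multiple_cards)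
    else (st.1, multiple_cards)
  else st

def winning_card (cards : List (List Int)) : Int :=
  let st := cards.foldl (fun st card => card.foldl (wcInnerA card) st) ([], [])
  if st.1 = [] then -1 else (PySem.List.max? st.1 (fun x => x)).getD 0

-- ===== PORT B =====
-- per-card body of B: counts dict, duplicate occurrences, first-duplicate event, running max
def wcStepB (st : PySem.Set Int × Option Int) (card : List Int) : PySem.Set Int × Option Int :=
  let counts := card.foldl (fun (d : PySem.Dict Int Int) n => d.insert n (d.getD n 0 + 1)) PySem.Dict.empty
  let dups := card.filter (fun n => counts.getD n 0 > 1)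
  match dups with
  | [] => st
  | d0 :: _ =>
    let seen := PySem.Set.add st.1 d0
    let good := PySem.Set.diff (PySem.Set.ofList card) seen
    let ans := match PySem.List.max? good (fun x => x) with
      | none => st.2
      | some m => match st.2 with
        | none => some m
        | some a => if m > a then some m else some a
    (PySem.Set.update seen dups, ans)

def winning_card_alt (cards : List (List Int)) : Int :=
  let st := cards.foldl wcStepB (PySem.Set.empty, none)
  match st.2 with | none => -1 | some a => a

-- ===== PRECONDITION & SPEC =====
def Spec_winning_card (cards : List (List Int)) (out : Int) : Prop := out = winning_card_alt cards
instance (cards : List (List Int)) (out : Int) : Decidable (Spec_winning_card cards out) := by unfold Spec_winning_card; infer_instance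

-- ===== CLAIM (what is proved, stated in full; the proofs are below) =====
def Claim_equal_winning_card : Prop := ∀ (cards : List (List Int)), Dom_winning_card cards → Spec_winning_card cards (winning_card cards)

-- ===== LEMMAS AND PROOFS =====

-- the "good cards" set A computes: distinct members of card not yet marked as duplicates
def wcGood (card mc : List Int) : List Int :=
  PySem.Set.diff (PySem.Set.ofList card) (PySem.Set.ofList mc)

-- the values A appends to final_cards while scanning suffix l of card with accumulator mc
def wcEv (card : List Int) : List Int → List Int → List Int
  | [], _ => []
  | n :: t, mc =>
    if PySem.List.count card n > 1 then
      (if PySem.Set.equal (wcGood card (mc ++ [n])) PySem.Set.empty = false then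
        [(PySem.List.max? (wcGood card (mc ++ [n])) (fun x => x)).getD 0] else [])
      ++ wcEv card t (mc ++ [n])
    else wcEv card t mc

lemma wcGood_mem (card mc : List Int) (x : Int) :
    x ∈ wcGood card mc ↔ x ∈ card ∧ x ∉ mc := by
  simp [wcGood, PySem.Set.mem_diff, PySem.Set.mem_ofList]

lemma wcEqual_empty_false_iff (g : PySem.Set Int) :
    PySem.Set.equal g PySem.Set.empty = false ↔ g ≠ [] := by
  rw [Bool.eq_false_iff, Ne, PySem.Set.equal_iff]
  simp [PySem.Set.empty, List.eq_nil_iff_forall_not_mem]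

-- max? with identity key on Int is characterised by membership + upper bound
lemma wcMax_spec (l : List Int) (m : Int) :
    PySem.List.max? l (fun x => x) = some m ↔ m ∈ l ∧ ∀ y ∈ l, y ≤ m := by
  constructor
  · intro h
    exact ⟨PySem.List.max?_mem h, fun y hy => PySem.List.max?_isMax h y hy⟩
  · rintro ⟨hm, hub⟩
    rcases h : PySem.List.max? l (fun x => x) with _ | m'
    · rw [PySem.List.max?_eq_none_iff] at h
      subst h; simp at hm
    · have h1 : m' ≤ m := hub m' (PySem.List.max?_mem h)
      have h2 : m ≤ m' := PySem.List.max?_isMax h m hm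
      rw [le_antisymm h1 h2]

lemma wcMax_append (l1 l2 : List Int) :
    PySem.List.max? (l1 ++ l2) (fun x => x) =
      match PySem.List.max? l2 (fun x => x) with
      | none => PySem.List.max? l1 (fun x => x)
      | some m => match PySem.List.max? l1 (fun x => x) with
        | none => some m
        | some a => if m > a then some m else some a := by
  rcases h2 : PySem.List.max? l2 (fun x => x) with _ | m
  · rw [PySem.List.max?_eq_none_iff] at h2; subst h2; simp
  · rcases h1 : PySem.List.max? l1 (fun x => x) with _ | a
    · rw [PySem.List.max?_eq_none_iff] at h1; subst h1; simpa using h2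
    · rw [wcMax_spec] at h1 h2
      show PySem.List.max? (l1 ++ l2) (fun x => x) = if m > a then some m else some a
      split_ifs with h <;> rw [wcMax_spec]
      · exact ⟨List.mem_append_right _ h2.1,
          fun y hy => by rcases List.mem_append.mp hy with hy | hy
                         · exact le_of_lt (lt_of_le_of_lt (h1.2 y hy) h)
                         · exact h2.2 y hy⟩
      · exact ⟨List.mem_append_left _ h1.1,
          fun y hy => by rcases List.mem_append.mp hy with hy | hy
                         · exact h1.2 y hy
                         · exact le_trans (h2.2 y hy) (by omega)⟩

-- A's inner fold splits into appended events and appended duplicates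
lemma wcInner_eq (card : List Int) :
    ∀ (l : List Int) (fc mc : List Int),
      l.foldl (wcInnerA card) (fc, mc) =
        (fc ++ wcEv card l mc, mc ++ l.filter (fun n => decide (PySem.List.count card n > 1))) := by
  intro l
  induction l with
  | nil => intro fc mc; simp [wcEv]
  | cons n t ih =>
    intro fc mc
    by_cases h : PySem.List.count card n > 1
    · have hd : (decide (PySem.List.count card n > 1)) = true := decide_eq_true h
      simp only [List.foldl_cons, List.filter_cons, hd, wcEv, wcInnerA, wcGood, if_pos h,
        if_true]
      split_ifs with hg
      · rw [ih]
        simp [List.append_assoc]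
      · rw [ih]
        simp [List.append_assoc]
    · have hd : (decide (PySem.List.count card n > 1)) = false := decide_eq_false h
      simp only [List.foldl_cons, List.filter_cons, hd, wcEv, wcInnerA, wcGood, if_neg h,
        if_false, Bool.false_eq_true]
      exact ih fc mc

lemma wcGood_empty_mono (card mc mc' : List Int) (hsub : ∀ x ∈ mc, x ∈ mc')
    (h : wcGood card mc = []) : wcGood card mc' = [] := by
  rw [List.eq_nil_iff_forall_not_mem] at h ⊢
  intro x hx
  rw [wcGood_mem] at hx
  exact h x (by rw [wcGood_mem]; exact ⟨hx.1, fun hm => hx.2 (hsub x hm)⟩)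

lemma wcEv_nil_of_empty (card : List Int) :
    ∀ (l mc : List Int), wcGood card mc = [] → wcEv card l mc = [] := by
  intro l
  induction l with
  | nil => intro mc _; rfl
  | cons n t ih =>
    intro mc hmc
    have hmc' : wcGood card (mc ++ [n]) = [] :=
      wcGood_empty_mono card mc (mc ++ [n]) (fun x hx => List.mem_append_left _ hx) hmc
    by_cases h : PySem.List.count card n > 1
    · simp only [wcEv, if_pos h]
      simp [hmc', ih _ hmc']
    · simp only [wcEv, if_neg h]
      exact ih _ hmc

lemma wcEv_le (card : List Int) :
    ∀ (l mc : List Int) (m : Int), (∀ v ∈ wcGood card mc, v ≤ m) →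
      ∀ v ∈ wcEv card l mc, v ≤ m := by
  intro l
  induction l with
  | nil => intro mc m _ v hv; simp [wcEv] at hv
  | cons n t ih =>
    intro mc m hub v hv
    have hub' : ∀ w ∈ wcGood card (mc ++ [n]), w ≤ m := by
      intro w hw
      rw [wcGood_mem] at hw
      exact hub w (by rw [wcGood_mem]; exact ⟨hw.1, fun hm => hw.2 (List.mem_append_left _ hm)⟩)
    by_cases h : PySem.List.count card n > 1
    · simp only [wcEv, if_pos h] at hv
      rcases List.mem_append.mp hv with hv | hv
      · split_ifs at hv with hg
        · rcases hg' : PySem.List.max? (wcGood card (mc ++ [n])) (fun x => x) with _ | mx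
          · exact absurd ((PySem.List.max?_eq_none_iff _ _).mp hg')
              (by rwa [wcEqual_empty_false_iff] at hg)
          · simp only [List.mem_singleton] at hv
            rw [hv, hg']
            exact hub' mx (PySem.List.max?_mem hg')
        · simp at hv
      · exact ih (mc ++ [n]) m hub' v hv
    · simp only [wcEv, if_neg h] at hv
      exact ih mc m hub v hv

lemma wcEv_nil_of_filter_nil (card : List Int) :
    ∀ (l mc : List Int), l.filter (fun n => decide (PySem.List.count card n > 1)) = [] →
      wcEv card l mc = [] := by
  intro l
  induction l with
  | nil => intro mc _; rfl
  | cons n t ih =>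
    intro mc hf
    rw [List.filter_cons] at hf
    by_cases h : PySem.List.count card n > 1
    · have h' : (1 : Nat) < List.count n card := h
      simp [h'] at hf
    · have h' : ¬ (1 : Nat) < List.count n card := h
      simp only [wcEv, if_neg h]
      exact ih mc (by simpa [h'] using hf)

-- the key lemma: the max over all events of one card is the max of the good set
-- right after the FIRST duplicate was recorded (later events only shrink the set)
lemma wcEv_max (card : List Int) :
    ∀ (l mc : List Int),
      PySem.List.max? (wcEv card l mc) (fun x => x) =
        (l.find? (fun n => decide (PySem.List.count card n > 1))).bind
          (fun n => PySem.List.max? (wcGood card (mc ++ [n])) (fun x => x)) := by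
  intro l
  induction l with
  | nil => intro mc; simp [wcEv]
  | cons n t ih =>
    intro mc
    by_cases h : PySem.List.count card n > 1
    · have hd : decide (PySem.List.count card n > 1) = true := decide_eq_true h
      simp only [wcEv, if_pos h, List.find?_cons, hd]
      have hb : ((some n).bind fun a => PySem.List.max? (wcGood card (mc ++ [a])) fun x => x)
          = PySem.List.max? (wcGood card (mc ++ [n])) fun x => x := rfl
      rw [hb]
      by_cases hg : PySem.Set.equal (wcGood card (mc ++ [n])) PySem.Set.empty = false
      · rcases hm : PySem.List.max? (wcGood card (mc ++ [n])) (fun x => x) with _ | m1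
        · exact absurd ((PySem.List.max?_eq_none_iff _ _).mp hm)
            (by rwa [wcEqual_empty_false_iff] at hg)
        · rw [if_pos hg]
          simp only [Option.getD_some, List.singleton_append]
          rw [wcMax_spec]
          refine ⟨List.mem_cons_self, fun y hy => ?_⟩
          rcases List.mem_cons.mp hy with rfl | hy
          · exact le_refl _
          · exact wcEv_le card t (mc ++ [n]) m1
              (fun v hv => PySem.List.max?_isMax hm v hv) y hy
      · have hnil : wcGood card (mc ++ [n]) = [] := by
          by_contra hne
          exact hg ((wcEqual_empty_false_iff _).mpr hne)
        rw [if_neg hg, wcEv_nil_of_empty card t _ hnil,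
          (PySem.List.max?_eq_none_iff (wcGood card (mc ++ [n])) (fun x => x)).mpr hnil]
        rfl
    · have hd : decide (PySem.List.count card n > 1) = false := decide_eq_false h
      simp only [wcEv, if_neg h, List.find?_cons, hd]
      exact ih mc

lemma wcFind_of_filter_cons (p : Int → Bool) :
    ∀ (l : List Int) (d0 : Int) (r : List Int), l.filter p = d0 :: r → l.find? p = some d0 := by
  intro l
  induction l with
  | nil => intro d0 r h; simp at h
  | cons n t ih =>
    intro d0 r h
    rw [List.filter_cons] at h
    rw [List.find?_cons]
    by_cases hp : p n = true
    · simp [hp] at h ⊢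
      exact h.1
    · rw [Bool.not_eq_true] at hp
      simp [hp] at h ⊢
      exact ih d0 r h

-- outer invariant: seen has the same members as multiple_cards, ans is the max of final_cards
lemma wcOuter (cards : List (List Int)) :
    ∀ (fc mc : List Int) (seen : PySem.Set Int) (ans : Option Int),
      (∀ x : Int, x ∈ seen ↔ x ∈ mc) →
      ans = PySem.List.max? fc (fun x => x) →
      (∀ x : Int, x ∈ (cards.foldl wcStepB (seen, ans)).1 ↔
          x ∈ (cards.foldl (fun st card => card.foldl (wcInnerA card) st) (fc, mc)).2) ∧
      (cards.foldl wcStepB (seen, ans)).2 =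
        PySem.List.max? (cards.foldl (fun st card => card.foldl (wcInnerA card) st) (fc, mc)).1 (fun x => x) := by
  induction cards with
  | nil => intro fc mc seen ans hmem hans; exact ⟨hmem, hans⟩
  | cons card cs ih =>
    intro fc mc seen ans hmem hans
    subst hans
    simp only [List.foldl_cons]
    have hfilt : card.filter (fun n =>
        decide ((card.foldl (fun (d : PySem.Dict Int Int) n => d.insert n (d.getD n 0 + 1))
          PySem.Dict.empty).getD n 0 > 1))
        = card.filter (fun n => decide (PySem.List.count card n > 1)) := by
      apply List.filter_congr
      intro x _
      rw [PySem.Dict.getD_foldl_insert_add_one, decide_eq_decide]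
      simp only [PySem.Dict.getD_empty, PySem.List.count]
      omega
    rw [wcInner_eq card card fc mc]
    simp only [wcStepB]
    rw [hfilt]
    rcases hd : card.filter (fun n => decide (PySem.List.count card n > 1)) with _ | ⟨d0, r⟩
    · rw [wcEv_nil_of_filter_nil card card mc hd]
      simp only [List.append_nil]
      exact ih fc mc seen _ hmem rfl
    · have hmem' : ∀ x : Int, x ∈ PySem.Set.add seen d0 ↔ x ∈ PySem.Set.ofList (mc ++ [d0]) := by
        intro x
        rw [PySem.Set.mem_add, PySem.Set.mem_ofList, hmem x, List.mem_append]
        simp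
      have hcont : ∀ x : Int, PySem.Set.contains (PySem.Set.add seen d0) x
          = PySem.Set.contains (PySem.Set.ofList (mc ++ [d0])) x := by
        intro x
        cases hb : PySem.Set.contains (PySem.Set.ofList (mc ++ [d0])) x with
        | true =>
          exact (PySem.Set.contains_iff (PySem.Set.add seen d0) x).mpr
            ((hmem' x).mpr ((PySem.Set.contains_iff (PySem.Set.ofList (mc ++ [d0])) x).mp hb))
        | false =>
          rw [← Bool.not_eq_true] at hb ⊢
          rw [PySem.Set.contains_iff] at hb ⊢
          exact fun hx => hb ((hmem' x).mp hx)
      have hgood : PySem.Set.diff (PySem.Set.ofList card) (PySem.Set.add seen d0)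
          = wcGood card (mc ++ [d0]) := by
        unfold wcGood PySem.Set.diff
        exact List.filter_congr (fun x _ => by rw [hcont x])
      have hevmax : PySem.List.max? (wcEv card card mc) (fun x => x)
          = PySem.List.max? (wcGood card (mc ++ [d0])) (fun x => x) := by
        rw [wcEv_max card card mc, wcFind_of_filter_cons _ card d0 r hd]
        rfl
      have hmem2 : ∀ x : Int, x ∈ PySem.Set.update (PySem.Set.add seen d0) (d0 :: r)
          ↔ x ∈ mc ++ d0 :: r := by
        intro x
        rw [PySem.Set.mem_update, PySem.Set.mem_add, hmem x, List.mem_append]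
        simp only [List.mem_cons]
        tauto
      have hans2 : (match PySem.List.max? (PySem.Set.diff (PySem.Set.ofList card)
            (PySem.Set.add seen d0)) (fun x => x) with
          | none => PySem.List.max? fc (fun x => x)
          | some m => match PySem.List.max? fc (fun x => x) with
            | none => some m
            | some a => if m > a then some m else some a)
          = PySem.List.max? (fc ++ wcEv card card mc) (fun x => x) := by
        rw [wcMax_append, hevmax, hgood]
      exact ih (fc ++ wcEv card card mc) (mc ++ d0 :: r) _ _ hmem2 hans2

-- ===== VERDICT (by name: the statement is the Claim_ definition above) =====
lemma wcFinal (stA : List Int × List Int) (stB : PySem.Set Int × Option Int)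
    (h : stB.2 = PySem.List.max? stA.1 (fun x => x)) :
    (if stA.1 = [] then (-1 : Int) else (PySem.List.max? stA.1 (fun x => x)).getD 0) =
      (match stB.2 with | none => -1 | some a => a) := by
  rcases hfc : stA.1 with _ | ⟨a, t⟩
  · rw [h, hfc, (PySem.List.max?_eq_none_iff _ _).mpr rfl]
    simp
  · rw [h, hfc]
    rcases hm : PySem.List.max? (a :: t) (fun x => x) with _ | m
    · exact absurd (PySem.List.max?_eq_none_iff _ _ |>.mp hm) (by simp)
    · simp

theorem winning_card_spec : Claim_equal_winning_card := by
  intro cards _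
  unfold Spec_winning_card winning_card winning_card_alt
  exact wcFinal _ _ (wcOuter cards [] [] PySem.Set.empty none (by simp [PySem.Set.empty]) ((PySem.List.max?_eq_none_iff _ _).mpr rfl).symm).2
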